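-- pv_equiv track=rewrite | github.com/alleneee/topsport-agent | src/topsport_agent/skills/_frontmatter.py | parse
-- ===== SOURCE A (Python) =====
-- def parse(text: str) -> tuple[dict[str, str], str]:
--     """手写 frontmatter 解析器，零依赖替代 pyyaml。
--
--     覆盖单行 key: value 和 YAML block scalar（| 保留换行，> 折叠为空格）。
--     注意：key 中的连字符（如 argument-hint）原样保留，不做下划线转换。
--     """
--     # 标准 frontmatter 以 --- 开头和结尾，中间为 YAML 头部，之后为正文
--     if not text.startswith("---\n"):
--         return {}, text
--     end = text.find("\n---\n", 4)
--     if end == -1: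
--         return {}, text
--     header = text[4:end]
--     body = text[end + 5 :].lstrip("\n")
--     meta: dict[str, str] = {}
--     current_key: str | None = None
--     block_style: str | None = None
--
--     for line in header.splitlines():
--         # 缩进行属于前一个 block scalar 的延续内容
--         if current_key is not None and block_style is not None:
--             if line.startswith("  ") or line.startswith("\t"):
--                 existing = meta.get(current_key, "")
--                 stripped = line.strip()
--                 if block_style == "|":
--                     meta[current_key] = (existing + "\n" + stripped).strip()
--                 else:
--                     meta[current_key] = (existing + " " + stripped).strip()
--                 continue
--             current_key = None
--             block_style = None
--
--         if ":" not in line: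
--             continue
--
--         key, _, value = line.partition(":")
--         key = key.strip()
--         value = value.strip()
--
--         # 值为 | 或 > 时进入 block scalar 模式，后续缩进行拼接为多行值
--         if value in ("|", ">"):
--             current_key = key
--             block_style = value
--             meta[key] = ""
--             continue
--
--         current_key = None
--         block_style = None
--         meta[key] = value
--
--     return meta, body
-- ===== SOURCE B (Python) =====
-- def parse(text: str) -> tuple[dict[str, str], str]:
--     """Frontmatter parser: index-driven scan; block scalars consumed by an
--     inner loop collecting non-empty stripped lines, then joined once."""
--     if not text.startswith("---\n"):
--         return {}, text
--     end = text.find("\n---\n", 4)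
--     if end == -1:
--         return {}, text
--     header = text[4:end]
--     body = text[end + 5:].lstrip("\n")
--     lines = header.splitlines()
--     meta: dict[str, str] = {}
--     i = 0
--     n = len(lines)
--     while i < n:
--         line = lines[i]
--         i += 1
--         if ":" not in line:
--             continue
--         key, _, value = line.partition(":")
--         key = key.strip()
--         value = value.strip()
--         if value in ("|", ">"):
--             parts = []
--             while i < n and (lines[i].startswith("  ") or lines[i].startswith("\t")):
--                 s = lines[i].strip()
--                 if s:
--                     parts.append(s)
--                 i += 1
--             meta[key] = ("\n" if value == "|" else " ").join(parts)
--         else: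
--             meta[key] = value
--     return meta, body
-- ===== Notes on version B (the rewrite author's own statement) =====
-- stated objective: simpler
-- what changed: Replaced A's current_key/block_style continuation-flag state machine over header lines by an index-driven scan whose inner loop consumes each block scalar's indented lines at once, collecting the non-empty stripped lines and joining them once instead of re-stripping a growing accumulator on every line.
import Mathlib
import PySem

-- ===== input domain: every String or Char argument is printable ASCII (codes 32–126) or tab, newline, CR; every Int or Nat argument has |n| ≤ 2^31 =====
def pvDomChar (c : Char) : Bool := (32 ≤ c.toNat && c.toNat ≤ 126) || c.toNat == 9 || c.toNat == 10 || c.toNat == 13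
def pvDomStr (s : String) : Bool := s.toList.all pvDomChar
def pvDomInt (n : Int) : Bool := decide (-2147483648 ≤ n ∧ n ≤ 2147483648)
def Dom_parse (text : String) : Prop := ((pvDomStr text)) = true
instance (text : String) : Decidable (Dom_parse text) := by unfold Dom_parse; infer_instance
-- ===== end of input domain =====

-- B replaces A's continuation-flag state machine by an index-free scan that consumes each
-- block scalar with an inner takeWhile and joins its non-empty stripped lines once (simpler).

-- shared helper: str.partition(":") restricted to what both Pythons use (key part, value part)
def pvPartitionColon : List Char → List Char × List Char
  | [] => ([], [])
  | c :: rest =>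
    if c = ':' then ([], rest)
    else
      let p := pvPartitionColon rest
      (c :: p.1, p.2)

-- shared helper: line.startswith("  ") or line.startswith("\t")
def pvIndent (line : List Char) : Bool :=
  PySem.Chars.startswith line [' ', ' '] || PySem.Chars.startswith line ['\t']

-- ===== PORT A =====
-- body of A's loop from the "if ':' not in line" check down (current_key/block_style cleared)
def pvStepKV (md : PySem.Dict (List Char) (List Char)) (line : List Char) :
    PySem.Dict (List Char) (List Char) × Option (List Char) × Option (List Char) :=
  if PySem.Chars.isIn [':'] line = false then (md, none, none)
  else
    let p := pvPartitionColon line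
    let key := PySem.Chars.strip p.1
    let value := PySem.Chars.strip p.2
    if value = ['|'] ∨ value = ['>'] then (md.insert key [], some key, some value)
    else (md.insert key value, none, none)

-- one iteration of A's for-loop over header lines (state: md, current_key, block_style)
def pvStepA (st : PySem.Dict (List Char) (List Char) × Option (List Char) × Option (List Char))
    (line : List Char) :
    PySem.Dict (List Char) (List Char) × Option (List Char) × Option (List Char) :=
  match st with
  | (md, some k, some sty) =>
    if pvIndent line then
      let existing := md.getD k []
      let stripped := PySem.Chars.strip line
      if sty = ['|'] then
        (md.insert k (PySem.Chars.strip (existing ++ '\n' :: stripped)), some k, some sty)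
      else
        (md.insert k (PySem.Chars.strip (existing ++ ' ' :: stripped)), some k, some sty)
    else pvStepKV md line
  | (md, _, _) => pvStepKV md line

def parse (text : String) : (List (String × String)) × String :=
  let cs := text.toList
  if PySem.Chars.startswith cs ['-', '-', '-', '\n'] = false then ([], text)
  else
    let e := PySem.Chars.findFrom cs ['\n', '-', '-', '-', '\n'] 4
    if e = -1 then ([], text)
    else
      let header := PySem.List.slice cs (some 4) (some e)
      -- text[end+5:].lstrip("\n"): str.lstrip(chars) drops leading chars only — exact hand port
      let body := (PySem.List.slice cs (some (e + 5)) none).dropWhile (· = '\n')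
      let fin := (PySem.Chars.splitlines header).foldl pvStepA (PySem.Dict.empty, none, none)
      (fin.1.items.map (fun p => (String.ofList p.1, String.ofList p.2)), String.ofList body)

-- ===== PORT B =====
def pvLoopB : List (List Char) → PySem.Dict (List Char) (List Char) →
    PySem.Dict (List Char) (List Char)
  | [], md => md
  | line :: rest, md =>
    if PySem.Chars.isIn [':'] line = false then pvLoopB rest md
    else
      let p := pvPartitionColon line
      let key := PySem.Chars.strip p.1
      let value := PySem.Chars.strip p.2
      if value = ['|'] ∨ value = ['>'] then
        let parts := ((rest.takeWhile pvIndent).map PySem.Chars.strip).filter (fun s => !s.isEmpty)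
        let sep := if value = ['|'] then ['\n'] else [' ']
        pvLoopB (rest.dropWhile pvIndent) (md.insert key (PySem.Chars.join sep parts))
      else pvLoopB rest (md.insert key value)
termination_by lines _ => lines.length
decreasing_by
  all_goals simp
  exact List.length_dropWhile_le _ _

def parse_alt (text : String) : (List (String × String)) × String :=
  let cs := text.toList
  if PySem.Chars.startswith cs ['-', '-', '-', '\n'] = false then ([], text)
  else
    let e := PySem.Chars.findFrom cs ['\n', '-', '-', '-', '\n'] 4
    if e = -1 then ([], text)
    else
      let header := PySem.List.slice cs (some 4) (some e)
      -- text[end+5:].lstrip("\n"): str.lstrip(chars) drops leading chars only — exact hand port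
      let body := (PySem.List.slice cs (some (e + 5)) none).dropWhile (· = '\n')
      let md := pvLoopB (PySem.Chars.splitlines header) PySem.Dict.empty
      (md.items.map (fun p => (String.ofList p.1, String.ofList p.2)), String.ofList body)

-- ===== PRECONDITION & SPEC =====
def Spec_parse (text : String) (out : (List (String × String)) × String) : Prop := out = parse_alt text
instance (text : String) (out : (List (String × String)) × String) : Decidable (Spec_parse text out) := by unfold Spec_parse; infer_instance

-- ===== CLAIM (what is proved, stated in full; the proofs are below) =====
def Claim_equal_parse : Prop := ∀ (text : String), Dom_parse text → Spec_parse text (parse text)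

-- ===== LEMMAS AND PROOFS =====

-- a "clean" chunk: nonempty, no leading or trailing whitespace
def pvClean (v : List Char) : Prop :=
  v ≠ [] ∧ PySem.Chars.lstrip v = v ∧ PySem.Chars.rstrip v = v

theorem pvDW_head {p : Char → Bool} {l : List Char} :
    ∀ x ∈ (List.dropWhile p l).head?, p x = false := by
  induction l with
  | nil => simp
  | cons c t ih =>
    intro x hx
    by_cases hc : p c
    · rw [List.dropWhile_cons_of_pos hc] at hx; exact ih x hx
    · rw [List.dropWhile_cons_of_neg hc] at hx
      simp at hx; subst hx; simpa using hc

theorem pvDW_eq_self {p : Char → Bool} {l : List Char}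
    (h : ∀ x ∈ l.head?, p x = false) : List.dropWhile p l = l := by
  cases l with
  | nil => rfl
  | cons c t =>
    have : p c = false := h c (by simp)
    simp [this]

theorem pvHead_false_of_dropWhile_eq_self {p : Char → Bool} {l : List Char}
    (h : List.dropWhile p l = l) : ∀ x ∈ l.head?, p x = false := by
  cases l with
  | nil => simp
  | cons c t =>
    intro x hx; simp at hx; subst hx
    by_contra hpc
    rw [List.dropWhile_cons_of_pos (by simpa using hpc)] at h
    have := List.length_dropWhile_le p t
    rw [h] at this; simp at this

theorem pvLstrip_append_of_clean {a : List Char} (b : List Char)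
    (ha : a ≠ []) (h : PySem.Chars.lstrip a = a) :
    PySem.Chars.lstrip (a ++ b) = a ++ b := by
  cases a with
  | nil => exact absurd rfl ha
  | cons c t =>
    have hc := pvHead_false_of_dropWhile_eq_self (p := PySem.Chars.isspace) h c (by simp)
    simp [PySem.Chars.lstrip, hc]

theorem pvRstrip_append_of_clean (a : List Char) {b : List Char}
    (hb : b ≠ []) (h : PySem.Chars.rstrip b = b) :
    PySem.Chars.rstrip (a ++ b) = a ++ b := by
  have h' : List.dropWhile PySem.Chars.isspace b.reverse = b.reverse := by
    have := congrArg List.reverse h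
    simpa [PySem.Chars.rstrip] using this
  cases hr : b.reverse with
  | nil => exact absurd (by simpa using congrArg List.reverse hr) hb
  | cons y s =>
    have hy := pvHead_false_of_dropWhile_eq_self (p := PySem.Chars.isspace) (hr ▸ h') y (by simp)
    have : PySem.Chars.rstrip (a ++ b) =
        (List.dropWhile PySem.Chars.isspace (b.reverse ++ a.reverse)).reverse := by
      simp [PySem.Chars.rstrip]
    rw [this, hr, List.cons_append, List.dropWhile_cons_of_neg (by simp [hy]), ← List.cons_append,
      ← hr, List.reverse_append, List.reverse_reverse, List.reverse_reverse]

theorem pvRstrip_append_space {a : List Char} {c : Char}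
    (hc : PySem.Chars.isspace c = true) (h : PySem.Chars.rstrip a = a) :
    PySem.Chars.rstrip (a ++ [c]) = a := by
  have : PySem.Chars.rstrip (a ++ [c]) =
      (List.dropWhile PySem.Chars.isspace (c :: a.reverse)).reverse := by
    simp [PySem.Chars.rstrip]
  rw [this, List.dropWhile_cons_of_pos hc]
  simpa [PySem.Chars.rstrip] using h

theorem pvStrip_cons_space {c : Char} (b : List Char)
    (hc : PySem.Chars.isspace c = true) :
    PySem.Chars.strip (c :: b) = PySem.Chars.strip b := by
  simp [PySem.Chars.strip, PySem.Chars.lstrip, hc]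

theorem pvClean_strip {l : List Char} (h : PySem.Chars.strip l ≠ []) :
    pvClean (PySem.Chars.strip l) := by
  have hm : ∀ x ∈ (PySem.Chars.lstrip l).head?, PySem.Chars.isspace x = false :=
    pvDW_head
  have hrfix : PySem.Chars.rstrip (PySem.Chars.strip l) = PySem.Chars.strip l := by
    have : (PySem.Chars.strip l).reverse =
        List.dropWhile PySem.Chars.isspace (PySem.Chars.lstrip l).reverse := by
      simp [PySem.Chars.strip, PySem.Chars.rstrip]
    simp only [PySem.Chars.rstrip, this]
    rw [pvDW_eq_self pvDW_head]
    simp [PySem.Chars.strip, PySem.Chars.rstrip]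
  have hpre : PySem.Chars.strip l <+: PySem.Chars.lstrip l := by
    rw [← List.reverse_suffix]
    have : (PySem.Chars.strip l).reverse =
        List.dropWhile PySem.Chars.isspace (PySem.Chars.lstrip l).reverse := by
      simp [PySem.Chars.strip, PySem.Chars.rstrip]
    rw [this]; exact List.dropWhile_suffix _
  obtain ⟨t, ht⟩ := hpre
  have hlfix : PySem.Chars.lstrip (PySem.Chars.strip l) = PySem.Chars.strip l := by
    apply pvDW_eq_self
    intro x hx
    apply hm
    cases hs : PySem.Chars.strip l with
    | nil => exact absurd hs h
    | cons y s =>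
      rw [hs] at hx
      simp at hx
      rw [← ht, hs, List.cons_append]
      simpa using hx
  exact ⟨h, hlfix, hrfix⟩

theorem pvStrip_of_clean {a : List Char} (h : pvClean a) : PySem.Chars.strip a = a := by
  obtain ⟨_, hl, hr⟩ := h
  simp [PySem.Chars.strip, hl, hr]

theorem pvClean_append {a b : List Char} (c : Char) (ha : pvClean a) (hb : pvClean b) :
    pvClean (a ++ c :: b) := by
  obtain ⟨ha0, hal, har⟩ := ha
  obtain ⟨hb0, hbl, hbr⟩ := hb
  refine ⟨by simp [ha0], pvLstrip_append_of_clean _ ha0 hal, ?_⟩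
  have : a ++ c :: b = (a ++ [c]) ++ b := by simp
  rw [this, pvRstrip_append_of_clean _ hb0 hbr]

theorem pvStrip_append_clean {a b : List Char} (c : Char) (ha : pvClean a) (hb : pvClean b) :
    PySem.Chars.strip (a ++ c :: b) = a ++ c :: b :=
  pvStrip_of_clean (pvClean_append c ha hb)

theorem pvStrip_append_space {a : List Char} {c : Char}
    (hc : PySem.Chars.isspace c = true) (ha : pvClean a) :
    PySem.Chars.strip (a ++ [c]) = a := by
  obtain ⟨ha0, hal, har⟩ := ha
  simp [PySem.Chars.strip, pvLstrip_append_of_clean _ ha0 hal, pvRstrip_append_space hc har]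

theorem pvJoin_clean {c : Char} {vals : List (List Char)}
    (h0 : vals ≠ []) (h : ∀ v ∈ vals, pvClean v) :
    pvClean (PySem.Chars.join [c] vals) := by
  induction vals with
  | nil => exact absurd rfl h0
  | cons v rest ih =>
    cases rest with
    | nil => simpa [PySem.Chars.join, List.intercalate] using h v (by simp)
    | cons w rs =>
      rw [PySem.Chars.join_cons_cons]
      have hres : v ++ [c] ++ PySem.Chars.join [c] (w :: rs) =
          v ++ c :: PySem.Chars.join [c] (w :: rs) := by simp
      rw [hres]
      exact pvClean_append c (h v (by simp)) (ih (by simp) (fun x hx => h x (by simp [hx])))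

theorem pvJoin_append_single (c : Char) (vals : List (List Char)) (t : List Char)
    (h0 : vals ≠ []) :
    PySem.Chars.join [c] (vals ++ [t]) = PySem.Chars.join [c] vals ++ c :: t := by
  induction vals with
  | nil => exact absurd rfl h0
  | cons v rest ih =>
    cases rest with
    | nil =>
      show PySem.Chars.join [c] [v, t] = PySem.Chars.join [c] [v] ++ c :: t
      rw [PySem.Chars.join_cons_cons, PySem.Chars.join_singleton, PySem.Chars.join_singleton]
      simp
    | cons w rs =>
      show PySem.Chars.join [c] (v :: (w :: rs ++ [t])) = _
      have h1 : v :: (w :: rs ++ [t]) = v :: (w :: (rs ++ [t])) := by simp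
      rw [h1, PySem.Chars.join_cons_cons]
      have h2 : (w :: (rs ++ [t])) = (w :: rs) ++ [t] := by simp
      rw [h2, ih (by simp), PySem.Chars.join_cons_cons]
      simp

-- the crux: A's per-line  strip(acc + sep + strip(line))  accumulation equals B's
-- "join the non-empty stripped lines" once acc is itself such a join
theorem pvBlockStep {c : Char} (hc : PySem.Chars.isspace c = true)
    {vals : List (List Char)} (hv : ∀ v ∈ vals, pvClean v) (l : List Char) :
    PySem.Chars.strip (PySem.Chars.join [c] vals ++ c :: PySem.Chars.strip l) =
      PySem.Chars.join [c]
        (vals ++ if (PySem.Chars.strip l).isEmpty then [] else [PySem.Chars.strip l]) := by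
  by_cases ht : PySem.Chars.strip l = []
  · rw [ht]
    cases vals with
    | nil => simp [PySem.Chars.join, List.intercalate, PySem.Chars.strip, PySem.Chars.lstrip,
        PySem.Chars.rstrip, hc]
    | cons v rest =>
      have hcl := pvJoin_clean (c := c) (vals := v :: rest) (by simp) hv
      have : PySem.Chars.join [c] (v :: rest) ++ c :: ([] : List Char) =
          PySem.Chars.join [c] (v :: rest) ++ [c] := rfl
      rw [this, pvStrip_append_space hc hcl]
      simp
  · have htc : pvClean (PySem.Chars.strip l) := pvClean_strip ht
    have hne : (PySem.Chars.strip l).isEmpty = false := by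
      simpa [List.isEmpty_iff] using ht
    simp only [hne, Bool.false_eq_true, if_false]
    cases vals with
    | nil =>
      rw [PySem.Chars.join_nil, List.nil_append, pvStrip_cons_space _ hc, pvStrip_of_clean htc,
        List.nil_append, PySem.Chars.join_singleton]
    | cons v rest =>
      have hcl := pvJoin_clean (c := c) (vals := v :: rest) (by simp) hv
      rw [pvStrip_append_clean c hcl htc, pvJoin_append_single c _ _ (by simp)]

-- equation lemmas for pvLoopB
theorem pvLoopB_nil (md : PySem.Dict (List Char) (List Char)) : pvLoopB [] md = md := by
  simp [pvLoopB]

theorem pvLoopB_cons (line : List Char) (rest : List (List Char))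
    (md : PySem.Dict (List Char) (List Char)) :
    pvLoopB (line :: rest) md =
      if PySem.Chars.isIn [':'] line = false then pvLoopB rest md
      else
        let p := pvPartitionColon line
        let key := PySem.Chars.strip p.1
        let value := PySem.Chars.strip p.2
        if value = ['|'] ∨ value = ['>'] then
          let parts := ((rest.takeWhile pvIndent).map PySem.Chars.strip).filter (fun s => !s.isEmpty)
          let sep := if value = ['|'] then ['\n'] else [' ']
          pvLoopB (rest.dropWhile pvIndent) (md.insert key (PySem.Chars.join sep parts))
        else pvLoopB rest (md.insert key value) := by
  rw [pvLoopB]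

-- A's loop in block-scalar state vs B's takeWhile/dropWhile consumption
theorem pvBlock (rest : List (List Char))
    (Hmain : ∀ ls : List (List Char), ls.length ≤ rest.length →
      ∀ md, (List.foldl pvStepA (md, none, none) ls).1 = pvLoopB ls md)
    (md : PySem.Dict (List Char) (List Char)) (k sty : List Char)
    (vals : List (List Char)) (hv : ∀ v ∈ vals, pvClean v) :
    (List.foldl pvStepA
        (md.insert k (PySem.Chars.join [if sty = ['|'] then '\n' else ' '] vals),
          some k, some sty) rest).1 =
      pvLoopB (rest.dropWhile pvIndent)
        (md.insert k (PySem.Chars.join [if sty = ['|'] then '\n' else ' ']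
          (vals ++ ((rest.takeWhile pvIndent).map PySem.Chars.strip).filter
            (fun s => !s.isEmpty)))) := by
  induction rest generalizing md vals with
  | nil => simp [pvLoopB_nil]
  | cons l rest ih =>
    have hc : PySem.Chars.isspace (if sty = ['|'] then '\n' else ' ') = true := by
      by_cases h : sty = ['|'] <;> simp [h] <;> decide
    by_cases hi : pvIndent l = true
    · rw [List.foldl_cons]
      have hstep : pvStepA
          (md.insert k (PySem.Chars.join [if sty = ['|'] then '\n' else ' '] vals),
            some k, some sty) l =
          (md.insert k (PySem.Chars.join [if sty = ['|'] then '\n' else ' ']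
            (vals ++ if (PySem.Chars.strip l).isEmpty then [] else [PySem.Chars.strip l])),
            some k, some sty) := by
        simp only [pvStepA, hi, if_pos, PySem.Dict.getD_insert_self]
        by_cases hsty : sty = ['|']
        · simp only [hsty, if_pos, PySem.Dict.insert_insert_self]
          rw [pvBlockStep (by decide) hv]
        · simp only [hsty, if_false, PySem.Dict.insert_insert_self]
          have hc' : PySem.Chars.isspace ' ' = true := by decide
          have := pvBlockStep (c := ' ') hc' hv l
          simp only [hsty, if_false] at *
          rw [this]
      rw [hstep]
      rw [ih (fun ls hls m => Hmain ls (by simp; omega) m) md _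
        (by intro v hv'; rcases List.mem_append.mp hv' with h | h
            · exact hv v h
            · split at h
              · simp at h
              · simp at h; subst h
                exact pvClean_strip (by
                  rename_i hemp
                  simpa [List.isEmpty_iff] using hemp))]
      rw [List.takeWhile_cons_of_pos hi, List.dropWhile_cons_of_pos hi]
      simp only [List.map_cons, List.filter_cons, List.append_assoc]
      by_cases hxe : PySem.Chars.strip l = [] <;> simp [hxe]
    · have hstep : pvStepA
          (md.insert k (PySem.Chars.join [if sty = ['|'] then '\n' else ' '] vals),
            some k, some sty) l =
          pvStepKV (md.insert k (PySem.Chars.join [if sty = ['|'] then '\n' else ' '] vals)) l := by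
        simp [pvStepA, hi]
      rw [List.foldl_cons, hstep,
        List.takeWhile_cons_of_neg (by simpa using hi),
        List.dropWhile_cons_of_neg (by simpa using hi)]
      have := Hmain (l :: rest) (by simp)
        (md.insert k (PySem.Chars.join [if sty = ['|'] then '\n' else ' '] vals))
      rw [List.foldl_cons] at this
      have hkv : pvStepA
          ((md.insert k (PySem.Chars.join [if sty = ['|'] then '\n' else ' '] vals)),
            (none : Option (List Char)), (none : Option (List Char))) l =
          pvStepKV (md.insert k (PySem.Chars.join [if sty = ['|'] then '\n' else ' '] vals)) l := by
        simp [pvStepA]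
      rw [hkv] at this
      rw [this]
      simp

theorem pvMain : ∀ (n : Nat) (lines : List (List Char)), lines.length ≤ n →
    ∀ md, (List.foldl pvStepA (md, none, none) lines).1 = pvLoopB lines md := by
  intro n
  induction n with
  | zero =>
    intro lines hl md
    have : lines = [] := List.length_eq_zero_iff.mp (Nat.le_zero.mp hl)
    subst this; simp [pvLoopB_nil]
  | succ n ih =>
    intro lines hl md
    cases lines with
    | nil => simp [pvLoopB_nil]
    | cons line rest =>
      rw [List.foldl_cons, pvLoopB_cons]
      have hrest : rest.length ≤ n := by simp at hl; omega
      have hkv : pvStepA (md, (none : Option (List Char)), (none : Option (List Char))) line =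
          pvStepKV md line := by simp [pvStepA]
      rw [hkv]
      by_cases hcol : PySem.Chars.isIn [':'] line = false
      · simp only [pvStepKV, hcol, if_pos]
        rw [ih rest hrest md]
      · have hcol' : PySem.Chars.isIn [':'] line = true := by
          cases h : PySem.Chars.isIn [':'] line
          · exact absurd h hcol
          · rfl
        simp only [pvStepKV, hcol', Bool.true_eq_false, if_false]
        set key := PySem.Chars.strip (pvPartitionColon line).1 with hkey
        set value := PySem.Chars.strip (pvPartitionColon line).2 with hvalue
        by_cases hbs : value = ['|'] ∨ value = ['>']
        · simp only [hbs, if_pos]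
          have hjoin : ([] : List Char) =
              PySem.Chars.join [if value = ['|'] then '\n' else ' '] [] := by
            simp [PySem.Chars.join, List.intercalate]
          rw [hjoin]
          rw [pvBlock rest (fun ls hls m => ih ls (le_trans hls hrest) m) md key value []
            (by simp)]
          have hsep : [if value = ['|'] then '\n' else ' '] =
              (if value = ['|'] then ['\n'] else [' ']) := by
            by_cases h : value = ['|'] <;> simp [h]
          rw [hsep]
          simp
        · simp only [hbs, if_false]
          rw [ih rest hrest]

-- ===== VERDICT (by name: the statement is the Claim_ definition above) =====
theorem parse_spec : Claim_equal_parse := by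
  intro text _
  unfold Spec_parse parse parse_alt
  simp only
  split
  · rfl
  · split
    · rfl
    · have := pvMain (PySem.Chars.splitlines (PySem.List.slice text.toList (some 4)
        (some (PySem.Chars.findFrom text.toList ['\n', '-', '-', '-', '\n'] 4)))).length _
        le_rfl PySem.Dict.empty
      rw [this]
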